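-- pv_equiv track=rewrite | github.com/wbf22/micro_spreadsheet | micro_spreadsheet.py | convert_cell_name_to_x_y
-- ===== SOURCE A (Python) =====
-- def convert_cell_name_to_x_y(name: str) -> tuple[int, int]:
--     col = []
--     last = 0
--     for i, c in enumerate(name):
--         last = i
--         if c.isdigit():
--             break
--         col.append(c)
--     col = ''.join(col)
--
--     row = []
--     for i, c in enumerate(name[last:]):
--         if not c.isdigit():
--             break
--         row.append(c)
--     row = ''.join(row)
--
--     y = int(row)
--     x = 0
--     for i, c in enumerate(col):
--         order = ord(c) - ord('a') + 1
--         power = len(col) - 1 - i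
--         x += 26**power * order
--     x -= 1
--
--     return x, y
-- ===== SOURCE B (Python) =====
-- def convert_cell_name_to_x_y(name: str) -> tuple[int, int]:
--     # single pass: a 2-state scan that accumulates the column value and the digit run together
--     x = 0
--     row = ''
--     in_digits = False
--     for c in name:
--         if c.isdigit():
--             in_digits = True
--             row += c
--         elif in_digits:
--             break
--         else:
--             x = x * 26 + ord(c) - ord('a') + 1
--     return x - 1, int(row)  # ValueError when name has no digit, exactly as A
-- ===== Notes on version B (the rewrite author's own statement) =====
-- stated objective: simpler
-- what changed: A's three staged loops (collect column chars with break, re-scan name[last:] for the digit run, then a powers-of-26 sum) are replaced by one single pass over name driven by a two-state accumulator that builds the column value and the digit run simultaneously and breaks at the first non-digit after the digits.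
import Mathlib
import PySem

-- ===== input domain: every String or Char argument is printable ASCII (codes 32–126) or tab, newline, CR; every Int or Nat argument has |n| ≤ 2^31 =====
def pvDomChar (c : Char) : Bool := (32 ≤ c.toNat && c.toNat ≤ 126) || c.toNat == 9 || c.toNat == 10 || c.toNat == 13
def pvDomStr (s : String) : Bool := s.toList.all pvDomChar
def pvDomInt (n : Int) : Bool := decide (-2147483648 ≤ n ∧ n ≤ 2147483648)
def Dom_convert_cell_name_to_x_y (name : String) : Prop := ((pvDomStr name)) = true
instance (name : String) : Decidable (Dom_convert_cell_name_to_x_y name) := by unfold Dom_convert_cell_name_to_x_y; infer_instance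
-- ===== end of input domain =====

-- B replaces A's three staged loops by ONE pass over the name with a two-state accumulator that
-- builds the column value and the digit run together; objective: simpler. Raises are excluded by Pre_.


-- ===== PORT A =====
-- first loop: 'for i, c in enumerate(name): last = i; if c.isdigit(): break; col.append(c)'
def aColLoop : List (Int × Char) → List Char → Int → List Char × Int
  | [], col, last => (col, last)
  | (i, c) :: rest, col, _ =>
      if PySem.Chars.isdigit c then (col, i) else aColLoop rest (col ++ [c]) i

-- second loop: 'for i, c in enumerate(name[last:]): if not c.isdigit(): break; row.append(c)' (the index is unused)
def aRowLoop : List Char → List Char → List Char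
  | [], row => row
  | c :: rest, row => if !(PySem.Chars.isdigit c) then row else aRowLoop rest (row ++ [c])

-- third loop: 'x += 26**power * order' with power = len(col) - 1 - i
def aXLoop : List (Int × Char) → Int → Int → Int
  | [], _, x => x
  | (i, c) :: rest, n, x =>
      aXLoop rest n (x + 26 ^ (n - 1 - i).toNat * ((c.toNat : Int) - 97 + 1))

def convert_cell_name_to_x_y (name : String) : Int × Int :=
  let L := name.toList
  let cl := aColLoop (PySem.List.enumerate L) [] 0
  let row := aRowLoop (PySem.List.slice L (some cl.2) none) []
  -- y = int(row); int raises ValueError when the digit run is empty — excluded by Pre_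
  let y := (PySem.Int.ofChars? row).getD 0
  let x := aXLoop (PySem.List.enumerate cl.1) (PySem.List.len cl.1) 0
  (x - 1, y)

-- ===== PORT B =====
-- the single for-loop of Source B: state (x, row, in_digits); 'break' = returning the state
def bLoop : List Char → Int → List Char → Bool → Int × List Char
  | [], x, row, _ => (x, row)
  | c :: rest, x, row, ind =>
      if PySem.Chars.isdigit c then bLoop rest x (row ++ [c]) true
      else if ind then (x, row)                                   -- break
      else bLoop rest (x * 26 + ((c.toNat : Int) - 97 + 1)) row ind

def convert_cell_name_to_x_y_alt (name : String) : Int × Int :=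
  let s := bLoop name.toList 0 [] false
  -- int(row) raises ValueError when the run is empty — excluded by Pre_
  (s.1 - 1, (PySem.Int.ofChars? s.2).getD 0)

-- ===== PRECONDITION & SPEC =====
-- Pre_: A raises ValueError (int of an empty digit run) exactly when the name contains no digit character.
def Pre_convert_cell_name_to_x_y (name : String) : Prop :=
  name.toList.any (fun c => PySem.Chars.isdigit c) = true
instance (name : String) : Decidable (Pre_convert_cell_name_to_x_y name) := by
  unfold Pre_convert_cell_name_to_x_y; infer_instance
def pvWitness_convert_cell_name_to_x_y : String := "ab12"

def Spec_convert_cell_name_to_x_y (name : String) (out : Int × Int) : Prop := out = convert_cell_name_to_x_y_alt name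
instance (name : String) (out : Int × Int) : Decidable (Spec_convert_cell_name_to_x_y name out) := by unfold Spec_convert_cell_name_to_x_y; infer_instance

-- ===== CLAIM (what is proved, stated in full; the proofs are below) =====
def Claim_equal_convert_cell_name_to_x_y : Prop := ∀ (name : String), Dom_convert_cell_name_to_x_y name → Pre_convert_cell_name_to_x_y name → Spec_convert_cell_name_to_x_y name (convert_cell_name_to_x_y name)

-- ===== LEMMAS AND PROOFS =====

-- abbreviation used only by the proofs
def hornerStep (a : Int) (c : Char) : Int := a * 26 + ((c.toNat : Int) - 97 + 1)

lemma aColLoop_spec :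
    ∀ (L : List Char) (k : Nat) (acc : List Char) (last : Int), L ≠ [] →
      aColLoop (PySem.List.enumerate L (k : Int)) acc last =
        (acc ++ L.takeWhile (fun c => !(PySem.Chars.isdigit c)),
         if L.findIdx (fun c => PySem.Chars.isdigit c) < L.length
           then ((k + L.findIdx (fun c => PySem.Chars.isdigit c) : Nat) : Int)
           else ((k + (L.length - 1) : Nat) : Int)) := by
  intro L
  induction L with
  | nil => intro _ _ _ h; exact absurd rfl h
  | cons c rest ih =>
      intro k acc last _
      rw [PySem.List.enumerate_cons]
      by_cases h : PySem.Chars.isdigit c = true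
      · simp [aColLoop, h, List.findIdx_cons]
      · simp only [Bool.not_eq_true] at h
        have hcast : ((k : Int) + 1) = ((k + 1 : Nat) : Int) := by push_cast; ring
        rw [aColLoop, if_neg (by simp [h]), hcast]
        rcases eq_or_ne rest [] with hrest | hrest
        · subst hrest
          simp [PySem.List.enumerate_nil, aColLoop, List.findIdx_cons, h]
        · rw [ih (k + 1) (acc ++ [c]) (k : Int) hrest]
          simp only [Prod.mk.injEq]
          refine ⟨?_, ?_⟩
          · simp [h]
          · have hlen : 0 < rest.length := List.length_pos_iff.mpr hrest
            simp only [List.findIdx_cons, h, cond_false, List.length_cons]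
            by_cases hf : rest.findIdx (fun c => PySem.Chars.isdigit c) < rest.length
            · rw [if_pos (by omega), if_pos (by omega)]
              push_cast; ring
            · rw [if_neg (by omega), if_neg (by omega)]
              congr 1; omega

lemma aRowLoop_spec :
    ∀ (X acc : List Char),
      aRowLoop X acc = acc ++ X.takeWhile (fun c => PySem.Chars.isdigit c) := by
  intro X
  induction X with
  | nil => intro acc; simp [aRowLoop]
  | cons c rest ih =>
      intro acc
      by_cases h : PySem.Chars.isdigit c = true
      · simp [aRowLoop, h, ih]
      · simp only [Bool.not_eq_true] at h
        simp [aRowLoop, h]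

lemma foldl_hornerStep_acc :
    ∀ (l : List Char) (a : Int),
      l.foldl hornerStep a = a * 26 ^ l.length + l.foldl hornerStep 0 := by
  intro l
  induction l with
  | nil => intro a; simp
  | cons c rest ih =>
      intro a
      rw [List.foldl_cons, List.foldl_cons, ih (hornerStep a c),
        ih (hornerStep 0 c)]
      simp only [hornerStep, List.length_cons]
      ring

lemma aXLoop_spec :
    ∀ (l : List Char) (k : Nat) (n : Nat) (x : Int), k + l.length ≤ n →
      aXLoop (PySem.List.enumerate l (k : Int)) (n : Int) x =
        x + l.foldl hornerStep 0 * 26 ^ (n - k - l.length) := by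
  intro l
  induction l with
  | nil => intro k n x _; simp [PySem.List.enumerate_nil, aXLoop]
  | cons c rest ih =>
      intro k n x hle
      simp only [List.length_cons] at hle
      rw [PySem.List.enumerate_cons, aXLoop]
      have hcast : ((k : Int) + 1) = ((k + 1 : Nat) : Int) := by push_cast; ring
      rw [hcast, ih (k + 1) n _ (by omega)]
      have hpow : ((n : Int) - 1 - (k : Int)).toNat = n - 1 - k := by omega
      rw [hpow]
      rw [List.foldl_cons, show hornerStep 0 c = ((c.toNat : Int) - 97 + 1) by
        simp [hornerStep], foldl_hornerStep_acc rest ((c.toNat : Int) - 97 + 1)]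
      have h1 : n - 1 - k = rest.length + (n - k - (rest.length + 1)) := by omega
      have h2 : n - (k + 1) - rest.length = n - k - (rest.length + 1) := by omega
      rw [h1, h2, pow_add]
      simp only [List.length_cons]
      ring

lemma takeWhile_digit_nil (X : List Char) (h : ∀ c ∈ X, PySem.Chars.isdigit c = false) :
    X.takeWhile (fun c => PySem.Chars.isdigit c) = [] := by
  cases X with
  | nil => rfl
  | cons c rest => simp [h c (by simp)]

-- B, digit phase: once in_digits is set the loop appends the digit run and stops
lemma bLoop_digits :
    ∀ (L : List Char) (x : Int) (row : List Char),
      bLoop L x row true = (x, row ++ L.takeWhile (fun c => PySem.Chars.isdigit c)) := by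
  intro L
  induction L with
  | nil => intro x row; simp [bLoop]
  | cons c rest ih =>
      intro x row
      by_cases h : PySem.Chars.isdigit c = true
      · simp [bLoop, h, ih]
      · simp only [Bool.not_eq_true] at h
        simp [bLoop, h]

-- B, full run: the single pass produces the Horner column value and the digit run after the split
lemma bLoop_spec :
    ∀ (L : List Char) (x : Int),
      bLoop L x [] false =
        ((L.takeWhile (fun c => !(PySem.Chars.isdigit c))).foldl hornerStep x,
         (L.drop (L.findIdx (fun c => PySem.Chars.isdigit c))).takeWhile
           (fun c => PySem.Chars.isdigit c)) := by
  intro L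
  induction L with
  | nil => intro x; simp [bLoop]
  | cons c rest ih =>
      intro x
      by_cases h : PySem.Chars.isdigit c = true
      · simp [bLoop, h, bLoop_digits, List.findIdx_cons]
      · simp only [Bool.not_eq_true] at h
        simp only [bLoop, h, Bool.false_eq_true, if_false]
        rw [ih]
        simp [List.findIdx_cons, h, hornerStep]

lemma ports_agree (name : String) :
    convert_cell_name_to_x_y name = convert_cell_name_to_x_y_alt name := by
  simp only [convert_cell_name_to_x_y, convert_cell_name_to_x_y_alt]
  set L := name.toList with hL
  set f := L.findIdx (fun c => PySem.Chars.isdigit c) with hf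
  have hfle : f ≤ L.length := List.findIdx_le_length
  rw [bLoop_spec]
  have hx : ∀ col : List Char,
      aXLoop (PySem.List.enumerate col) (PySem.List.len col) 0 =
        col.foldl hornerStep 0 := by
    intro col
    have h := aXLoop_spec col 0 col.length 0 (by omega)
    simp only [Nat.cast_zero, Nat.sub_zero, Nat.sub_self, pow_zero, mul_one,
      zero_add] at h
    rw [PySem.List.len_eq, h]
  rcases eq_or_ne L [] with hnil | hne
  · simp [hnil, PySem.List.enumerate_nil, aColLoop, aRowLoop, aXLoop,
      PySem.List.slice, PySem.List.len]
  · have hcol := aColLoop_spec L 0 [] 0 hne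
    simp only [Nat.cast_zero, Nat.zero_add, List.nil_append] at hcol
    rw [hcol]
    have hrow :
        aRowLoop (PySem.List.slice L
            (some (if f < L.length then ((f : Nat) : Int)
                   else ((L.length - 1 : Nat) : Int))) none) [] =
          (L.drop f).takeWhile (fun c => PySem.Chars.isdigit c) := by
      rw [aRowLoop_spec, List.nil_append]
      by_cases hflt : f < L.length
      · rw [if_pos hflt, PySem.List.slice_from_natCast]
      · have hfeq : f = L.length := by omega
        rw [if_neg hflt, PySem.List.slice_from_natCast]
        have hnd : ∀ c ∈ L, PySem.Chars.isdigit c = false := by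
          intro c hc
          by_contra hcd
          simp only [Bool.not_eq_false] at hcd
          have := List.findIdx_lt_length_of_exists
            (p := fun c => PySem.Chars.isdigit c) ⟨c, hc, hcd⟩
          omega
        rw [takeWhile_digit_nil _ (fun c hc => hnd c (List.mem_of_mem_drop hc)),
          takeWhile_digit_nil _ (fun c hc => hnd c (List.mem_of_mem_drop hc))]
    dsimp only
    rw [hrow, hx]

-- ===== VERDICT (by name: the statement is the Claim_ definition above) =====
theorem convert_cell_name_to_x_y_spec : Claim_equal_convert_cell_name_to_x_y := by
  intro name _ _
  unfold Spec_convert_cell_name_to_x_y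
  exact ports_agree name
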